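-- pv_equiv track=rewrite | github.com/Dylkln/Projet_AIOI | aioi/test_stats.py | count_loop_type
-- ===== SOURCE A (Python) =====
-- def count_loop_type(data_train):
-- 	"""
--
-- 	"""
-- 	loops = ["E", "I", "B", "S", "H", "X", "M"]
--
-- 	loop_index_dict = {}
-- 	predicted_loops = []
--
-- 	for loop in data_train["predicted_loop_type"]:
-- 		predicted_loops.append(loop)
--
-- 	for loop in predicted_loops:
-- 		for i, loop_type in enumerate(loop):
-- 			pos = i + 1
--
-- 			if pos not in loop_index_dict.keys():
-- 				loop_index_dict[pos] = {}
--
-- 			if loop_type not in loop_index_dict[pos].keys():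
-- 				loop_index_dict[pos][loop_type] = 0
-- 			loop_index_dict[pos][loop_type] += 1
--
-- 	for l in loops:
-- 		for pos in loop_index_dict.keys():
-- 			if l not in loop_index_dict[pos]:
-- 				loop_index_dict[pos][l] = 0
--
-- 	return loop_index_dict
-- ===== SOURCE B (Python) =====
-- def count_loop_type(data_train):
--     loops = ["E", "I", "B", "S", "H", "X", "M"]
--     rows = data_train["predicted_loop_type"]
--     maxlen = 0
--     for r in rows:
--         maxlen = max(maxlen, len(r))
--     result = {}
--     for j in range(maxlen):
--         counts = {}
--         for r in rows:
--             if j < len(r):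
--                 c = r[j]
--                 counts[c] = counts.get(c, 0) + 1
--         for l in loops:
--             counts.setdefault(l, 0)
--         result[j + 1] = counts
--     return result
-- ===== Notes on version B (the rewrite author's own statement) =====
-- stated objective: alternative
-- what changed: B traverses column-by-column (position-major): it computes the maximum string length, then for each position counts that column's characters across all strings and backfills the seven loop types at once, instead of A's row-major scan over every string with nested dict membership tests followed by a separate backfill double loop.
import Mathlib
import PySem

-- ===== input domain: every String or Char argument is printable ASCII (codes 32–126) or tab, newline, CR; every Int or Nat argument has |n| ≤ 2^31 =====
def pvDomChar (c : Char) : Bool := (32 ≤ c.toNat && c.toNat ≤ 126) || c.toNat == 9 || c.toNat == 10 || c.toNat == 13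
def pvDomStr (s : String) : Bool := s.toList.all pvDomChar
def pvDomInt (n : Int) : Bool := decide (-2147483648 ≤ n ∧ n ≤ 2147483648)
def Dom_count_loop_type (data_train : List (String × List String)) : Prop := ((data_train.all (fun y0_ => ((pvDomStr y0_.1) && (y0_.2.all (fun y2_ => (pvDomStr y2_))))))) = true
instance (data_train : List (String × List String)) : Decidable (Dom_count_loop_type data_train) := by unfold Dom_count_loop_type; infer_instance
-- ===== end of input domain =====

-- B counts column-by-column (position-major) instead of A's row-major scan; same result, stated and proved below.
-- Python iteration over a string yields 1-character strings; both ports carry the characters as Char and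
-- render the 1-character String keys at the very end, identically on both sides.

-- ===== PORT A =====
def pvLoops : List Char := ['E', 'I', 'B', 'S', 'H', 'X', 'M']

-- one iteration of A's inner `for i, loop_type in enumerate(loop)` body
def pvRowStepA (d : PySem.Dict Int (PySem.Dict Char Int)) (p : Int × Char) :
    PySem.Dict Int (PySem.Dict Char Int) :=
  let pos := p.1 + 1
  let d := if d.contains pos then d else d.insert pos PySem.Dict.empty
  let inner := d.getD pos PySem.Dict.empty
  let inner := if inner.contains p.2 then inner else inner.insert p.2 0
  d.insert pos (inner.insert p.2 (inner.getD p.2 0 + 1))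

def count_loop_type (data_train : List (String × List String)) : List (Int × List (String × Int)) :=
  match (PySem.Dict.mk data_train).get? "predicted_loop_type" with
  | none => []  -- Python raises KeyError here; excluded by Pre_
  | some rows =>
    let predicted_loops := rows.foldl (fun acc r => acc ++ [r]) []
    let d := predicted_loops.foldl
      (fun d r => (PySem.List.enumerate r.toList 0).foldl pvRowStepA d) PySem.Dict.empty
    let d := pvLoops.foldl
      (fun d l => d.keys.foldl
        (fun d' pos =>
          if (d'.getD pos PySem.Dict.empty).contains l then d'
          else d'.insert pos ((d'.getD pos PySem.Dict.empty).insert l 0)) d) d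
    d.items.map (fun p => (p.1, p.2.items.map (fun q => (String.ofList [q.1], q.2))))

-- ===== PORT B =====
-- count one column (0-based position j) across all rows
def pvColCountB (rows : List String) (j : Nat) : PySem.Dict Char Int :=
  rows.foldl
    (fun cnt r =>
      if j < r.toList.length then
        let c := r.toList.getD j ' '
        cnt.insert c (cnt.getD c 0 + 1)
      else cnt) PySem.Dict.empty

def pvBackfillB (inner : PySem.Dict Char Int) : PySem.Dict Char Int :=
  pvLoops.foldl (fun i l => i.setdefault l 0) inner

def count_loop_type_alt (data_train : List (String × List String)) : List (Int × List (String × Int)) :=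
  match (PySem.Dict.mk data_train).get? "predicted_loop_type" with
  | none => []
  | some rows =>
    let maxlen := rows.foldl (fun m r => max m r.toList.length) 0
    let result := (List.range maxlen).foldl
      (fun res j => res.insert ((j : Int) + 1) (pvBackfillB (pvColCountB rows j)))
      PySem.Dict.empty
    result.items.map (fun p => (p.1, p.2.items.map (fun q => (String.ofList [q.1], q.2))))

-- ===== PRECONDITION & SPEC =====
-- Pre_: Python A does data_train["predicted_loop_type"] and raises KeyError when the key is absent.
def Pre_count_loop_type (data_train : List (String × List String)) : Prop :=
  "predicted_loop_type" ∈ data_train.map Prod.fst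
instance (data_train : List (String × List String)) : Decidable (Pre_count_loop_type data_train) := by
  unfold Pre_count_loop_type; infer_instance
def pvWitness_count_loop_type : (List (String × List String)) :=
  [("predicted_loop_type", ["EEH", "EI"])]
def Spec_count_loop_type (data_train : List (String × List String)) (out : List (Int × List (String × Int))) : Prop := out = count_loop_type_alt data_train
instance (data_train : List (String × List String)) (out : List (Int × List (String × Int))) : Decidable (Spec_count_loop_type data_train out) := by unfold Spec_count_loop_type; infer_instance

-- ===== CLAIM (what is proved, stated in full; the proofs are below) =====
def Claim_equal_count_loop_type : Prop := ∀ (data_train : List (String × List String)), Dom_count_loop_type data_train → Pre_count_loop_type data_train → Spec_count_loop_type data_train (count_loop_type data_train)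

-- ===== LEMMAS AND PROOFS =====

-- the column at 0-based position j, in row order
def pvCol (rs : List (List Char)) (j : Nat) : List Char := rs.filterMap (fun r => r[j]?)

-- the maximum row length, as A's and B's folds compute it
def pvM (rs : List (List Char)) : Nat := rs.foldl (fun m r => max m r.length) 0

-- counting a column, B's (and, after simplification, A's) way
def pvCnt (rs : List (List Char)) (j : Nat) : PySem.Dict Char Int :=
  (pvCol rs j).foldl (fun cnt c => cnt.insert c (cnt.getD c 0 + 1)) PySem.Dict.empty

-- the dict A has built after processing the rows rs (before the backfill)
def pvDictOf (rs : List (List Char)) : PySem.Dict Int (PySem.Dict Char Int) :=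
  PySem.Dict.mk ((List.range (pvM rs)).map (fun (j : Nat) => ((j : Int) + 1, pvCnt rs j)))


-- value-map and loop body of A's backfill pass (the port's lambda, named for the lemmas)
def pvVf (l : Char) (p : Int × PySem.Dict Char Int) : Int × PySem.Dict Char Int :=
  (p.1, p.2.setdefault l 0)

def pvBody (l : Char) (d' : PySem.Dict Int (PySem.Dict Char Int)) (pos : Int) :
    PySem.Dict Int (PySem.Dict Char Int) :=
  if (d'.getD pos PySem.Dict.empty).contains l then d'
  else d'.insert pos ((d'.getD pos PySem.Dict.empty).insert l 0)

-- A's two-line inner update is exactly "insert c (getD c 0 + 1)"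
lemma pv_charStep (inner : PySem.Dict Char Int) (c : Char) :
    ((if inner.contains c then inner else inner.insert c 0).insert c
      ((if inner.contains c then inner else inner.insert c 0).getD c 0 + 1))
    = inner.insert c (inner.getD c 0 + 1) := by
  by_cases h : inner.contains c = true
  · simp [h]
  · have h' : inner.contains c = false := by simpa using h
    simp [h', PySem.Dict.getD_insert_self, PySem.Dict.insert_insert_self,
      PySem.Dict.getD_of_not_contains inner (0 : Int) h']

lemma pvM_append (rs : List (List Char)) (r : List Char) :
    pvM (rs ++ [r]) = max (pvM rs) r.length := by
  simp [pvM, List.foldl_append]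

lemma pvCol_append (rs : List (List Char)) (r : List Char) (j : Nat) :
    pvCol (rs ++ [r]) j = pvCol rs j ++ (r[j]?).toList := by
  simp only [pvCol, List.filterMap_append]
  cases h : r[j]? <;> simp [h]

lemma pvCol_nil_of_le (rs : List (List Char)) (j : Nat) (h : pvM rs ≤ j) :
    pvCol rs j = [] := by
  have hb := (PySem.List.le_foldl_max_nat rs (fun r => r.length) 0).2
  simp only [pvCol, List.filterMap_eq_nil_iff]
  intro r hr
  exact List.getElem?_eq_none (le_trans (hb r hr) h)

lemma pv_keys_nodup (M : Nat) :
    ((List.range M).map (fun (j : Nat) => ((j : Int) + 1))).Nodup := by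
  exact List.Nodup.map (fun a b hab => by omega) (List.nodup_range)

lemma pv_getD_dictRange (g : Nat → PySem.Dict Char Int) (M t : Nat) (h : t < M)
    (dflt : PySem.Dict Char Int) :
    (PySem.Dict.mk ((List.range M).map (fun (j : Nat) => ((j : Int) + 1, g j)))).getD
      ((t : Int) + 1) dflt = g t := by
  refine PySem.Dict.getD_of_mem_items _ ?_ ?_ dflt
  · exact List.mem_map.2 ⟨t, List.mem_range.2 h, rfl⟩
  · simpa [PySem.Dict.keys_mk, List.map_map, Function.comp] using pv_keys_nodup M

lemma pv_contains_dictRange (g : Nat → PySem.Dict Char Int) (M t : Nat) :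
    (PySem.Dict.mk ((List.range M).map (fun (j : Nat) => ((j : Int) + 1, g j)))).contains
      ((t : Int) + 1) = decide (t < M) := by
  rw [PySem.Dict.contains_eq_decide_mem_keys]
  simp only [PySem.Dict.keys_mk, List.map_map, Function.comp, List.mem_map, List.mem_range]
  rcases Nat.lt_or_ge t M with h | h
  · simp only [decide_eq_decide]
    exact ⟨fun _ => h, fun _ => ⟨t, h, rfl⟩⟩
  · simp only [decide_eq_decide]
    constructor
    · rintro ⟨j, hj, e⟩
      have : j = t := by omega
      omega
    · omega

lemma pv_insert_dictRange_lt (g : Nat → PySem.Dict Char Int) (M t : Nat) (h : t < M)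
    (v : PySem.Dict Char Int) :
    (PySem.Dict.mk ((List.range M).map (fun (j : Nat) => ((j : Int) + 1, g j)))).insert
      ((t : Int) + 1) v
    = PySem.Dict.mk ((List.range M).map
        (fun (j : Nat) => ((j : Int) + 1, if j = t then v else g j))) := by
  have hc : (PySem.Dict.mk ((List.range M).map
      (fun (j : Nat) => ((j : Int) + 1, g j)))).contains ((t : Int) + 1) = true := by
    rw [pv_contains_dictRange]; simpa using h
  apply PySem.Dict.ext
  rw [PySem.Dict.items_insert_of_contains _ _ hc]
  show ((List.range M).map _).map _ = _
  rw [List.map_map]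
  refine List.map_congr_left ?_
  intro j hj
  by_cases hjt : j = t
  · subst hjt; simp
  · have : ¬ ((j : Int) + 1 = (t : Int) + 1) := by omega
    simp [Function.comp, hjt, this]

lemma pv_getElem_snoc_ne (r : List Char) (c : Char) (j : Nat) (h : j ≠ r.length) :
    (r ++ [c])[j]? = r[j]? := by
  by_cases hj : j < r.length
  · rw [List.getElem?_append_left hj]
  · have h1 : r.length ≤ j := by omega
    have h2 : (r ++ [c]).length ≤ j := by simp; omega
    rw [List.getElem?_eq_none h1, List.getElem?_eq_none h2]

lemma pvCnt_snoc_ne (rs : List (List Char)) (r' : List Char) (c : Char) (j : Nat)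
    (h : j ≠ r'.length) :
    pvCnt (rs ++ [r' ++ ([c] : List Char)]) j = pvCnt (rs ++ [r']) j := by
  unfold pvCnt
  rw [pvCol_append, pvCol_append, pv_getElem_snoc_ne _ _ _ h]

lemma pvCnt_snoc_self (rs : List (List Char)) (r' : List Char) (c : Char) :
    pvCnt (rs ++ [r' ++ ([c] : List Char)]) r'.length
    = (pvCnt (rs ++ [r']) r'.length).insert c
        ((pvCnt (rs ++ [r']) r'.length).getD c 0 + 1) := by
  unfold pvCnt
  rw [pvCol_append, pvCol_append]
  have h1 : (r' ++ [c])[r'.length]? = some c := by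
    rw [List.getElem?_append_right (le_refl _)]
    simp
  have h2 : r'[r'.length]? = none := List.getElem?_eq_none (le_refl _)
  rw [h1, h2]
  simp [List.foldl_append]

lemma pv_map_replace (X Y : List (Int × PySem.Dict Char Int)) (k : Int)
    (v w : PySem.Dict Char Int) (hX : ∀ q ∈ X, q.1 ≠ k) (hY : ∀ q ∈ Y, q.1 ≠ k) :
    (X ++ (k, w) :: Y).map (fun q => if q.1 == k then (k, v) else q) = X ++ (k, v) :: Y := by
  induction X with
  | nil =>
    simp only [List.nil_append, List.map_cons, beq_self_eq_true, if_true]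
    congr 1
    calc Y.map (fun q => if q.1 == k then (k, v) else q)
        = Y.map id := List.map_congr_left (fun q hq => by simp [hY q hq])
      _ = Y := List.map_id Y
  | cons x X ih =>
    have hx : x.1 ≠ k := hX x (List.mem_cons_self)
    simp only [List.cons_append, List.map_cons]
    rw [if_neg (by simpa using hx), ih (fun q hq => hX q (List.mem_cons_of_mem _ hq))]

lemma pv_rowStep (rs : List (List Char)) (r' : List Char) (c : Char) :
    pvRowStepA (pvDictOf (rs ++ [r'])) ((r'.length : Int), c) = pvDictOf (rs ++ [r' ++ ([c] : List Char)]) := by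
  rcases Nat.lt_or_ge r'.length (pvM rs) with h | h
  · -- the position already exists
    have hMA : pvM (rs ++ [r']) = pvM rs := by rw [pvM_append]; omega
    have e1 : pvDictOf (rs ++ [r'])
        = PySem.Dict.mk ((List.range (pvM rs)).map
            (fun (j : Nat) => ((j : Int) + 1, pvCnt (rs ++ [r']) j))) := by
      rw [pvDictOf, hMA]
    have hc : (PySem.Dict.mk ((List.range (pvM rs)).map
        (fun (j : Nat) => ((j : Int) + 1, pvCnt (rs ++ [r']) j)))).contains
          ((r'.length : Int) + 1) = true := by
      rw [pv_contains_dictRange]; simpa using h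
    have hM2 : pvM (rs ++ [r' ++ ([c] : List Char)]) = pvM rs := by
      rw [pvM_append]; simp; omega
    rw [e1, pvRowStepA]
    simp only [hc, if_true]
    rw [pv_getD_dictRange _ _ _ h, pv_charStep, pv_insert_dictRange_lt _ _ _ h]
    rw [pvDictOf, hM2]
    refine congrArg PySem.Dict.mk (List.map_congr_left ?_)
    intro j hj
    by_cases hjt : j = r'.length
    · subst hjt; rw [pvCnt_snoc_self]; simp
    · rw [pvCnt_snoc_ne _ _ _ _ hjt]; simp [hjt]
  · -- new position at the end
    have hMA : pvM (rs ++ [r']) = r'.length := by rw [pvM_append]; omega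
    have e1 : pvDictOf (rs ++ [r'])
        = PySem.Dict.mk ((List.range r'.length).map
            (fun (j : Nat) => ((j : Int) + 1, pvCnt (rs ++ [r']) j))) := by
      rw [pvDictOf, hMA]
    have hc : (PySem.Dict.mk ((List.range r'.length).map
        (fun (j : Nat) => ((j : Int) + 1, pvCnt (rs ++ [r']) j)))).contains
          ((r'.length : Int) + 1) = false := by
      rw [pv_contains_dictRange]; simp
    -- the inserted-empty dict, as an explicit item list
    have e2 : (PySem.Dict.mk ((List.range r'.length).map
          (fun (j : Nat) => ((j : Int) + 1, pvCnt (rs ++ [r']) j)))).insert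
            ((r'.length : Int) + 1) PySem.Dict.empty
        = PySem.Dict.mk ((List.range r'.length).map
            (fun (j : Nat) => ((j : Int) + 1, pvCnt (rs ++ [r']) j))
            ++ [(((r'.length : Int) + 1), PySem.Dict.empty)]) := by
      apply PySem.Dict.ext
      rw [PySem.Dict.items_insert_of_not_contains _ _ hc]
    have hkeys : (((List.range r'.length).map
          (fun (j : Nat) => ((j : Int) + 1, pvCnt (rs ++ [r']) j))
          ++ [(((r'.length : Int) + 1), PySem.Dict.empty)]).map
          (fun (q : Int × PySem.Dict Char Int) => q.1)).Nodup := by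
      have := pv_keys_nodup (r'.length + 1)
      rw [List.range_succ, List.map_append] at this
      simpa [List.map_map, Function.comp] using this
    have hnd2 : (PySem.Dict.mk ((List.range r'.length).map
          (fun (j : Nat) => ((j : Int) + 1, pvCnt (rs ++ [r']) j))
          ++ [(((r'.length : Int) + 1), PySem.Dict.empty)])).keys.Nodup := by
      simpa [PySem.Dict.keys_mk] using hkeys
    have hget : (PySem.Dict.mk ((List.range r'.length).map
          (fun (j : Nat) => ((j : Int) + 1, pvCnt (rs ++ [r']) j))
          ++ [(((r'.length : Int) + 1), PySem.Dict.empty)])).getD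
            ((r'.length : Int) + 1) PySem.Dict.empty = PySem.Dict.empty := by
      refine PySem.Dict.getD_of_mem_items _ ?_ hnd2 _
      show _ ∈ _ ++ _
      simp
    have hc2 : (PySem.Dict.mk ((List.range r'.length).map
          (fun (j : Nat) => ((j : Int) + 1, pvCnt (rs ++ [r']) j))
          ++ [(((r'.length : Int) + 1), PySem.Dict.empty)])).contains
            ((r'.length : Int) + 1) = true := by
      rw [PySem.Dict.contains_eq_decide_mem_keys]
      simp [PySem.Dict.keys_mk]
    have e3 : (PySem.Dict.mk ((List.range r'.length).map
          (fun (j : Nat) => ((j : Int) + 1, pvCnt (rs ++ [r']) j))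
          ++ [(((r'.length : Int) + 1), PySem.Dict.empty)])).insert
            ((r'.length : Int) + 1)
            (PySem.Dict.empty.insert c ((PySem.Dict.empty.getD c (0 : Int)) + 1))
        = PySem.Dict.mk ((List.range r'.length).map
            (fun (j : Nat) => ((j : Int) + 1, pvCnt (rs ++ [r']) j))
            ++ [(((r'.length : Int) + 1),
                 PySem.Dict.empty.insert c ((PySem.Dict.empty.getD c (0 : Int)) + 1))]) := by
      apply PySem.Dict.ext
      rw [PySem.Dict.items_insert_of_contains _ _ hc2]
      show List.map _ (_ ++ (_ :: List.nil)) = _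
      rw [pv_map_replace]
      · intro q hq
        rcases List.mem_map.1 hq with ⟨j, hj, rfl⟩
        have : j < r'.length := List.mem_range.1 hj
        simp; omega
      · intro q hq; simp at hq
    have hcntA : pvCnt (rs ++ [r']) r'.length = PySem.Dict.empty := by
      have hcol : pvCol (rs ++ [r']) r'.length = [] := by
        rw [pvCol_append, pvCol_nil_of_le rs _ h]
        simp
      rw [pvCnt, hcol]
      rfl
    have hM2 : pvM (rs ++ [r' ++ ([c] : List Char)]) = r'.length + 1 := by
      rw [pvM_append]; simp; omega
    rw [e1, pvRowStepA]
    simp only [hc, Bool.false_eq_true, if_false]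
    rw [e2, hget, pv_charStep, e3]
    rw [pvDictOf, hM2, List.range_succ, List.map_append]
    refine congrArg PySem.Dict.mk ?_
    refine congrArg₂ List.append ?_ ?_
    · refine List.map_congr_left ?_
      intro j hj
      have hjt : j ≠ r'.length := by have := List.mem_range.1 hj; omega
      rw [pvCnt_snoc_ne _ _ _ _ hjt]
    · rw [List.map_singleton, pvCnt_snoc_self, hcntA]

lemma pv_row (r : List Char) (rs : List (List Char)) :
    (PySem.List.enumerate r 0).foldl pvRowStepA (pvDictOf rs) = pvDictOf (rs ++ [r]) := by
  induction r using List.reverseRecOn with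
  | nil =>
    show pvDictOf rs = pvDictOf (rs ++ [[]])
    rw [pvDictOf, pvDictOf, pvM_append]
    simp only [List.length_nil, Nat.max_zero]
    refine congrArg PySem.Dict.mk (List.map_congr_left ?_)
    intro j hj
    have : pvCol (rs ++ [([] : List Char)]) j = pvCol rs j := by
      rw [pvCol_append]; simp
    rw [pvCnt, pvCnt, this]
  | append_singleton r' c ih =>
    rw [PySem.List.enumerate_append, List.foldl_append, ih]
    show pvRowStepA (pvDictOf (rs ++ [r'])) ((0 : Int) + (r'.length : Int), c) = _
    rw [zero_add]
    exact pv_rowStep rs r' c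

lemma pv_prebackfill (rows : List String) :
    rows.foldl (fun d r => (PySem.List.enumerate r.toList 0).foldl pvRowStepA d) PySem.Dict.empty
    = pvDictOf (rows.map String.toList) := by
  induction rows using List.reverseRecOn with
  | nil =>
    show PySem.Dict.empty = pvDictOf []
    rfl
  | append_singleton rows r ih =>
    rw [List.foldl_append, List.map_append]
    show (PySem.List.enumerate r.toList 0).foldl pvRowStepA _ = _
    rw [ih, pv_row]
    simp


lemma pv_pass (l : Char) : ∀ (L2 L1 : List (Int × PySem.Dict Char Int)),
    ((L1 ++ L2).map (·.1)).Nodup →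
    (L2.map (·.1)).foldl (pvBody l) (PySem.Dict.mk (L1.map (pvVf l) ++ L2))
      = PySem.Dict.mk ((L1 ++ L2).map (pvVf l)) := by
  intro L2
  induction L2 with
  | nil => intro L1 hnd; simp
  | cons p L2' ih =>
    intro L1 hnd
    have hkeys0 : (PySem.Dict.mk (L1.map (pvVf l) ++ p :: L2')).keys
        = (L1 ++ p :: L2').map (·.1) := by
      simp [PySem.Dict.keys_mk, List.map_map, pvVf]
    have hnd0 : (PySem.Dict.mk (L1.map (pvVf l) ++ p :: L2')).keys.Nodup := by
      rw [hkeys0]; exact hnd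
    have hmem : (p.1, p.2) ∈ (PySem.Dict.mk (L1.map (pvVf l) ++ p :: L2')).items := by
      show (p.1, p.2) ∈ L1.map (pvVf l) ++ p :: L2'
      simp
    have hget : (PySem.Dict.mk (L1.map (pvVf l) ++ p :: L2')).getD p.1 PySem.Dict.empty
        = p.2 := PySem.Dict.getD_of_mem_items _ hmem hnd0 _
    have hnotin : p.1 ∉ L1.map (fun (q : Int × PySem.Dict Char Int) => q.1)
        ∧ p.1 ∉ L2'.map (fun (q : Int × PySem.Dict Char Int) => q.1) := by
      have h2 : ((L1.map (fun (q : Int × PySem.Dict Char Int) => q.1))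
          ++ p.1 :: (L2'.map (fun (q : Int × PySem.Dict Char Int) => q.1))).Nodup := by
        simpa using hnd
      rw [List.nodup_middle, List.nodup_cons] at h2
      exact ⟨fun hm => h2.1 (List.mem_append.2 (Or.inl hm)),
             fun hm => h2.1 (List.mem_append.2 (Or.inr hm))⟩
    have hstep : pvBody l (PySem.Dict.mk (L1.map (pvVf l) ++ p :: L2')) p.1
        = PySem.Dict.mk (L1.map (pvVf l) ++ pvVf l p :: L2') := by
      by_cases hcl : p.2.contains l = true
      · rw [pvBody, hget, if_pos hcl]
        have : pvVf l p = p := by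
          rw [pvVf, PySem.Dict.setdefault_of_contains _ _ hcl]
        rw [this]
      · have hcl' : p.2.contains l = false := by simpa using hcl
        rw [pvBody, hget, hcl']
        simp only [Bool.false_eq_true, if_false]
        have hc1 : (PySem.Dict.mk (L1.map (pvVf l) ++ p :: L2')).contains p.1 = true := by
          rw [PySem.Dict.contains_eq_decide_mem_keys, hkeys0]
          simp
        apply PySem.Dict.ext
        rw [PySem.Dict.items_insert_of_contains _ _ hc1]
        show (L1.map (pvVf l) ++ (p.1, p.2) :: L2').map _ = _
        rw [pv_map_replace _ _ _ _ _ ?hx ?hy]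
        case hx =>
          intro q hq
          rcases List.mem_map.1 hq with ⟨q0, hq0, rfl⟩
          intro he
          exact hnotin.1 (List.mem_map.2 ⟨q0, hq0, by simpa [pvVf] using he⟩)
        case hy =>
          intro q hq he
          exact hnotin.2 (List.mem_map.2 ⟨q, hq, he⟩)
        show _ = L1.map (pvVf l) ++ pvVf l p :: L2'
        rw [pvVf, PySem.Dict.setdefault_of_not_contains _ _ hcl']
    show ((p :: L2').map (·.1)).foldl (pvBody l) _ = _
    rw [List.map_cons, List.foldl_cons, hstep]
    have e4 : L1.map (pvVf l) ++ pvVf l p :: L2' = (L1 ++ [p]).map (pvVf l) ++ L2' := by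
      simp
    rw [e4, ih (L1 ++ [p]) (by simpa using hnd)]
    simp

lemma pv_backfill (ls : List Char) : ∀ (L : List (Int × PySem.Dict Char Int)),
    (L.map (·.1)).Nodup →
    ls.foldl (fun d l => d.keys.foldl (pvBody l) d) (PySem.Dict.mk L)
      = PySem.Dict.mk (L.map (fun p => (p.1, ls.foldl (fun i l => i.setdefault l 0) p.2))) := by
  induction ls with
  | nil =>
    intro L hnd
    simp
  | cons l ls ih =>
    intro L hnd
    show ls.foldl _ ((PySem.Dict.mk L).keys.foldl (pvBody l) (PySem.Dict.mk L)) = _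
    have hk : (PySem.Dict.mk L).keys = L.map (·.1) := by simp [PySem.Dict.keys_mk]
    have hpass := pv_pass l L [] (by simpa using hnd)
    simp only [List.nil_append, List.map_nil] at hpass
    rw [hk, hpass]
    have hnd' : ((L.map (pvVf l)).map (·.1)).Nodup := by
      simpa [List.map_map, pvVf] using hnd
    rw [ih (L.map (pvVf l)) hnd']
    rw [List.map_map]
    rfl

lemma pv_colcount (rows : List String) (j : Nat) :
    pvColCountB rows j = pvCnt (rows.map String.toList) j := by
  have aux : ∀ (rs : List (List Char)) (cnt : PySem.Dict Char Int),
      rs.foldl (fun cnt r =>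
        if j < r.length then
          (fun c => cnt.insert c (cnt.getD c 0 + 1)) (r.getD j ' ')
        else cnt) cnt
      = (rs.filterMap (fun r => r[j]?)).foldl
          (fun cnt c => cnt.insert c (cnt.getD c 0 + 1)) cnt := by
    intro rs
    induction rs with
    | nil => intro cnt; rfl
    | cons r rs ih =>
      intro cnt
      by_cases hj : j < r.length
      · have hg : r[j]? = some (r.getD j ' ') := by
          rw [List.getD_eq_getElem _ _ hj]
          exact List.getElem?_eq_getElem hj
        simp only [List.foldl_cons, List.filterMap_cons, hj, if_true, hg]
        exact ih _
      · have hg : r[j]? = none := List.getElem?_eq_none (by omega)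
        simp only [List.foldl_cons, List.filterMap_cons, hj, if_false, hg]
        exact ih _
  rw [pvColCountB, pvCnt, pvCol, ← aux (rows.map String.toList) PySem.Dict.empty,
    List.foldl_map]

lemma pv_B_items (rows : List String) (M : Nat) :
    ((List.range M).foldl
        (fun res j => res.insert ((j : Int) + 1) (pvBackfillB (pvColCountB rows j)))
        PySem.Dict.empty).items
    = (List.range M).map (fun (j : Nat) => ((j : Int) + 1, pvBackfillB (pvColCountB rows j))) := by
  have h := PySem.Dict.items_foldl_insert_fresh (List.range M)
    (fun (j : Nat) => ((j : Int) + 1))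
    (fun (j : Nat) => pvBackfillB (pvColCountB rows j))
    PySem.Dict.empty
    (fun a _ => by simp [pysem])
    (pv_keys_nodup M)
  simpa using h


-- ===== VERDICT (by name: the statement is the Claim_ definition above) =====
theorem count_loop_type_spec : Claim_equal_count_loop_type := by
  intro dt hdom hpre
  unfold Spec_count_loop_type count_loop_type count_loop_type_alt
  have hpre' : "predicted_loop_type" ∈ dt.map Prod.fst := hpre
  have hk : "predicted_loop_type" ∈ (PySem.Dict.mk dt).keys := by
    simpa [PySem.Dict.keys_mk] using hpre'
  cases hg : (PySem.Dict.mk dt).get? "predicted_loop_type" with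
  | none => rfl
  | some rows =>
    dsimp only
    have hpl : rows.foldl (fun acc r => acc ++ [r]) ([] : List String) = rows := by
      simpa using PySem.List.foldl_append_singleton_eq_self rows ([] : List String)
    rw [hpl, pv_prebackfill]
    have hlam : (fun (d : PySem.Dict Int (PySem.Dict Char Int)) (l : Char) =>
        d.keys.foldl (fun d' pos =>
          if (d'.getD pos PySem.Dict.empty).contains l then d'
          else d'.insert pos ((d'.getD pos PySem.Dict.empty).insert l 0)) d)
      = (fun d l => d.keys.foldl (pvBody l) d) := rfl
    rw [hlam, pvDictOf]
    rw [pv_backfill pvLoops _ (by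
      simpa [List.map_map, Function.comp] using pv_keys_nodup (pvM (rows.map String.toList)))]
    have hM : rows.foldl (fun m r => max m r.toList.length) 0
        = pvM (rows.map String.toList) := by
      rw [pvM, List.foldl_map]
    rw [hM]
    show List.map _ (PySem.Dict.mk _).items = List.map _ (_root_.List.foldl _ PySem.Dict.empty _).items
    rw [pv_B_items rows (pvM (rows.map String.toList))]
    show (((List.range _).map _).map _).map _ = _
    rw [List.map_map, List.map_map, List.map_map]
    refine List.map_congr_left ?_
    intro j hj
    simp only [Function.comp]
    rw [pv_colcount, pvBackfillB]
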